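-- pv_equiv track=rewrite | github.com/F0xedb/sh-completion | parse.py | function_match
-- ===== SOURCE A (Python) =====
-- def function_match(functions, elements, prefix="", delimiter="-"):
--     """
--     Check if an element if found in a function.
--     Returns the function list if found otherwise None
--     """
--     if (len(functions) == 0 or len(elements) == 0):
--         return None
--     matches = []
--     for function in functions:
--         name = function[0]
--         # check if name is equal to an element with prefix
--         # This check must run first because the naming is more specific thus more important
--         for element in elements:
--             element = prefix + delimiter + element
--             bare_element = prefix + element
--             if element == name or bare_element == name:
--                 matches.append((function, element))
--         if name in elements:
--             matches.append((function, name))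
--                 # look at the match that is the most verbose
--     func, Name = None, ""
--     for function,name in matches:
--         if len(name) > len(Name):
--             Name = name
--             func = function
--     if not func == None:
--         return func
--
--     return None
-- ===== SOURCE B (Python) =====
-- def function_match(functions, elements, prefix="", delimiter="-"):
--     """Single tracking pass: no intermediate matches list, no second max-scan."""
--     if not functions or not elements:
--         return None
--     best_func, best_name = None, ""
--     for function in functions:
--         name = function[0]
--         for element in elements:
--             cand = prefix + delimiter + element
--             if (cand == name or prefix + cand == name) and len(cand) > len(best_name):
--                 best_func, best_name = function, cand
--         if name in elements and len(name) > len(best_name):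
--             best_func, best_name = function, name
--     return best_func
-- ===== Notes on version B (the rewrite author's own statement) =====
-- stated objective: simpler
-- what changed: Replaces A's build-a-matches-list-then-rescan-for-the-longest-name two-phase loop by a single fused pass that tracks the running best (function, name) while generating candidates, eliminating the intermediate list and the second scan.
import Mathlib
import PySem

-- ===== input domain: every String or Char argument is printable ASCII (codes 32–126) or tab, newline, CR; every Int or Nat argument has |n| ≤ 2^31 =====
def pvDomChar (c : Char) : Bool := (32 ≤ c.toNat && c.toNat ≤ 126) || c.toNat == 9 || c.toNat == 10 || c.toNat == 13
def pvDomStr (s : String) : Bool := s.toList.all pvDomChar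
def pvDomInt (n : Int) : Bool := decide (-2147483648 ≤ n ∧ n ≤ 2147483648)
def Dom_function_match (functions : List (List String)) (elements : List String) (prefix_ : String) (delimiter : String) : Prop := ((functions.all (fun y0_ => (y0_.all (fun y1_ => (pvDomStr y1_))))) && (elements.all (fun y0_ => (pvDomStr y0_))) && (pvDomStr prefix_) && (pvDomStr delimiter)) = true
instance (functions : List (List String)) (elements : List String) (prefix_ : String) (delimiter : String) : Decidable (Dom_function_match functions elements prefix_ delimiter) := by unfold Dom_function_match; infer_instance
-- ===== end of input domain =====

-- B fuses A's build-then-rescan into one tracking pass (no intermediate matches list, no second max-scan); same return value.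


-- ===== PORT A =====
-- Strings are compared and concatenated through .toList (Python str equality/+/len are exact on List Char).
def function_match (functions : List (List String)) (elements : List String) (prefix_ : String) (delimiter : String) : Option (List String) :=
  if functions.length = 0 ∨ elements.length = 0 then none
  else
    let match_list : List (List String × List Char) := functions.foldl (fun ms function =>
      -- function[0]: Pre_ guarantees function ≠ [], so pyGetD is exact here
      let name := (PySem.List.pyGetD function 0 "").toList
      let ms := elements.foldl (fun ms element =>
        let element' := prefix_.toList ++ delimiter.toList ++ element.toList
        let bare_element := prefix_.toList ++ element'
        if element' = name ∨ bare_element = name then ms ++ [(function, element')] else ms) ms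
      if elements.any (fun e => e.toList = name) then ms ++ [(function, name)] else ms) []
    let r := match_list.foldl (fun (acc : Option (List String) × List Char) m =>
      if acc.2.length < m.2.length then (some m.1, m.2) else acc) (none, [])
    if ¬ (r.1 = none) then r.1 else none

-- ===== PORT B =====
def function_match_alt (functions : List (List String)) (elements : List String) (prefix_ : String) (delimiter : String) : Option (List String) :=
  if functions.isEmpty || elements.isEmpty then none
  else
    (functions.foldl (fun (best : Option (List String) × List Char) function =>
      let name := (PySem.List.pyGetD function 0 "").toList
      let best := elements.foldl (fun (best : Option (List String) × List Char) element =>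
        let cand := prefix_.toList ++ delimiter.toList ++ element.toList
        if (cand = name ∨ prefix_.toList ++ cand = name) ∧ best.2.length < cand.length
        then (some function, cand) else best) best
      if (elements.any (fun e => e.toList = name)) = true ∧ best.2.length < name.length
      then (some function, name) else best) (none, [])).1

-- ===== PRECONDITION & SPEC =====
-- Pre_ excludes exactly the inputs where Python A raises IndexError: a nonempty elements list together
-- with an empty inner function list (function[0]).
def Pre_function_match (functions : List (List String)) (elements : List String) (prefix_ : String) (delimiter : String) : Prop :=
  elements = [] ∨ ∀ f ∈ functions, f ≠ []
instance (functions : List (List String)) (elements : List String) (prefix_ : String) (delimiter : String) : Decidable (Pre_function_match functions elements prefix_ delimiter) := by unfold Pre_function_match; infer_instance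

def pvWitness_function_match : List (List String) × List String × String × String := ([["f"]], ["f"], "", "-")

def Spec_function_match (functions : List (List String)) (elements : List String) (prefix_ : String) (delimiter : String) (out : Option (List String)) : Prop := out = function_match_alt functions elements prefix_ delimiter
instance (functions : List (List String)) (elements : List String) (prefix_ : String) (delimiter : String) (out : Option (List String)) : Decidable (Spec_function_match functions elements prefix_ delimiter out) := by unfold Spec_function_match; infer_instance

-- ===== CLAIM (what is proved, stated in full; the proofs are below) =====
def Claim_equal_function_match : Prop := ∀ (functions : List (List String)) (elements : List String) (prefix_ : String) (delimiter : String), Dom_function_match functions elements prefix_ delimiter → Pre_function_match functions elements prefix_ delimiter → Spec_function_match functions elements prefix_ delimiter (function_match functions elements prefix_ delimiter)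

-- ===== LEMMAS AND PROOFS =====

-- the max-selection step of A's second loop / B's tracking update
def selStep (acc : Option (List String) × List Char) (m : List String × List Char) : Option (List String) × List Char :=
  if acc.2.length < m.2.length then (some m.1, m.2) else acc

-- the matches one function contributes, as a direct list
def matchesOf (elements : List String) (prefix_ delimiter : String) (function : List String) : List (List String × List Char) :=
  (elements.filter (fun element =>
      decide (prefix_.toList ++ delimiter.toList ++ element.toList = (PySem.List.pyGetD function 0 "").toList ∨
              prefix_.toList ++ (prefix_.toList ++ delimiter.toList ++ element.toList) = (PySem.List.pyGetD function 0 "").toList))).map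
    (fun element => (function, prefix_.toList ++ delimiter.toList ++ element.toList))
  ++ (if elements.any (fun e => e.toList = (PySem.List.pyGetD function 0 "").toList) then [(function, (PySem.List.pyGetD function 0 "").toList)] else [])

-- A's matches list is the flatMap of per-function contributions
lemma a_matches (functions : List (List String)) (elements : List String) (prefix_ delimiter : String) (ms : List (List String × List Char)) :
    functions.foldl (fun ms function =>
      if elements.any (fun e => e.toList = (PySem.List.pyGetD function 0 "").toList)
      then (elements.foldl (fun ms element =>
              if prefix_.toList ++ delimiter.toList ++ element.toList = (PySem.List.pyGetD function 0 "").toList ∨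
                 prefix_.toList ++ (prefix_.toList ++ delimiter.toList ++ element.toList) = (PySem.List.pyGetD function 0 "").toList
              then ms ++ [(function, prefix_.toList ++ delimiter.toList ++ element.toList)] else ms) ms)
           ++ [(function, (PySem.List.pyGetD function 0 "").toList)]
      else elements.foldl (fun ms element =>
              if prefix_.toList ++ delimiter.toList ++ element.toList = (PySem.List.pyGetD function 0 "").toList ∨
                 prefix_.toList ++ (prefix_.toList ++ delimiter.toList ++ element.toList) = (PySem.List.pyGetD function 0 "").toList
              then ms ++ [(function, prefix_.toList ++ delimiter.toList ++ element.toList)] else ms) ms) ms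
    = ms ++ functions.flatMap (matchesOf elements prefix_ delimiter) := by
  induction functions generalizing ms with
  | nil => simp
  | cons f fs ih =>
    simp only [List.foldl_cons, List.flatMap_cons, ih, matchesOf]
    rw [PySem.List.foldl_append_ite]
    split <;> simp

-- B's inner tracking loop is selStep-folding the filtered candidate list
lemma b_inner (elements : List String) (prefix_ delimiter : String) (function : List String)
    (name : List Char) (acc : Option (List String) × List Char) :
    elements.foldl (fun (best : Option (List String) × List Char) element =>
        if (prefix_.toList ++ delimiter.toList ++ element.toList = name ∨
            prefix_.toList ++ (prefix_.toList ++ delimiter.toList ++ element.toList) = name) ∧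
           best.2.length < (prefix_.toList ++ delimiter.toList ++ element.toList).length
        then (some function, prefix_.toList ++ delimiter.toList ++ element.toList) else best) acc
    = ((elements.filter (fun element =>
          decide (prefix_.toList ++ delimiter.toList ++ element.toList = name ∨
                  prefix_.toList ++ (prefix_.toList ++ delimiter.toList ++ element.toList) = name))).map
        (fun element => (function, prefix_.toList ++ delimiter.toList ++ element.toList))).foldl selStep acc := by
  induction elements generalizing acc with
  | nil => simp
  | cons e es ih =>
    simp only [List.foldl_cons, List.filter_cons]
    by_cases h : (prefix_.toList ++ delimiter.toList ++ e.toList = name ∨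
        prefix_.toList ++ (prefix_.toList ++ delimiter.toList ++ e.toList) = name)
    · rw [if_pos (decide_eq_true h), List.map_cons, List.foldl_cons]
      by_cases hl : acc.2.length < (prefix_.toList ++ delimiter.toList ++ e.toList).length
      · rw [if_pos ⟨h, hl⟩, ih]
        congr 1
        rw [selStep, if_pos hl]
      · rw [if_neg (fun hc => hl hc.2), ih]
        congr 1
        rw [selStep, if_neg hl]
    · rw [if_neg (fun hd => h (of_decide_eq_true hd)), if_neg (fun hc => h hc.1), ih]

-- B's whole fold is selStep-folding A's matches list
lemma b_outer (functions : List (List String)) (elements : List String) (prefix_ delimiter : String)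
    (acc : Option (List String) × List Char) :
    functions.foldl (fun (best : Option (List String) × List Char) function =>
      if (elements.any (fun e => e.toList = (PySem.List.pyGetD function 0 "").toList)) = true ∧
         (elements.foldl (fun (best : Option (List String) × List Char) element =>
            if (prefix_.toList ++ delimiter.toList ++ element.toList = (PySem.List.pyGetD function 0 "").toList ∨
                prefix_.toList ++ (prefix_.toList ++ delimiter.toList ++ element.toList) = (PySem.List.pyGetD function 0 "").toList) ∧
               best.2.length < (prefix_.toList ++ delimiter.toList ++ element.toList).length
            then (some function, prefix_.toList ++ delimiter.toList ++ element.toList) else best) best).2.length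
           < (PySem.List.pyGetD function 0 "").toList.length
      then (some function, (PySem.List.pyGetD function 0 "").toList)
      else elements.foldl (fun (best : Option (List String) × List Char) element =>
            if (prefix_.toList ++ delimiter.toList ++ element.toList = (PySem.List.pyGetD function 0 "").toList ∨
                prefix_.toList ++ (prefix_.toList ++ delimiter.toList ++ element.toList) = (PySem.List.pyGetD function 0 "").toList) ∧
               best.2.length < (prefix_.toList ++ delimiter.toList ++ element.toList).length
            then (some function, prefix_.toList ++ delimiter.toList ++ element.toList) else best) best) acc
    = (functions.flatMap (matchesOf elements prefix_ delimiter)).foldl selStep acc := by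
  induction functions generalizing acc with
  | nil => simp
  | cons f fs ih =>
    rw [List.foldl_cons, List.flatMap_cons, List.foldl_append, ih]
    congr 1
    simp only [matchesOf, List.foldl_append]
    rw [← b_inner elements prefix_ delimiter f ((PySem.List.pyGetD f 0 "").toList) acc]
    by_cases h : elements.any (fun e => e.toList = (PySem.List.pyGetD f 0 "").toList) = true
    · rw [if_pos h, List.foldl_cons, List.foldl_nil]
      by_cases hl : (List.foldl (fun (best : Option (List String) × List Char) element =>
            if (prefix_.toList ++ delimiter.toList ++ element.toList = (PySem.List.pyGetD f 0 "").toList ∨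
                prefix_.toList ++ (prefix_.toList ++ delimiter.toList ++ element.toList) = (PySem.List.pyGetD f 0 "").toList) ∧
               best.2.length < (prefix_.toList ++ delimiter.toList ++ element.toList).length
            then (some f, prefix_.toList ++ delimiter.toList ++ element.toList) else best) acc elements).2.length
          < (PySem.List.pyGetD f 0 "").toList.length
      · rw [if_pos ⟨h, hl⟩, selStep, if_pos hl]
      · rw [if_neg (fun hc => hl hc.2), selStep, if_neg hl]
    · rw [if_neg h, if_neg (fun hc => h hc.1), List.foldl_nil]

-- A's selector lambda is selStep
lemma sel_lambda : (fun (acc : Option (List String) × List Char) (m : List String × List Char) =>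
    if acc.2.length < m.2.length then (some m.1, m.2) else acc) = selStep := rfl

-- ===== VERDICT (by name: the statement is the Claim_ definition above) =====
theorem function_match_spec : Claim_equal_function_match := by
  intro functions elements prefix_ delimiter _ _
  unfold Spec_function_match function_match function_match_alt
  by_cases hf : functions = [] <;> by_cases he : elements = []
  · simp [hf, he]
  · simp [hf]
  · simp [he]
  · rw [if_neg (show ¬ (functions.length = 0 ∨ elements.length = 0) by
          simp [hf, he, List.length_eq_zero_iff]),
        if_neg (show ¬ ((functions.isEmpty || elements.isEmpty) = true) by
          simp [hf, he, List.isEmpty_iff])]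
    simp only [a_matches, b_outer, List.nil_append, sel_lambda]
    split_ifs with h
    · exact h.symm
    · rfl
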